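-- pv_equiv track=rewrite | github.com/ashwani-opstree/code-playground | leetcode/shuttleMission.py | missionsCompleted
-- ===== SOURCE A (Python) =====
-- def missionsCompleted(alpha2beta, beta2alpha, missions):
-- 	currentTime = 0
--
-- 	for i in range(missions):
-- 		for j in range(len(alpha2beta)):
-- 			if currentTime <= alpha2beta[j]:
-- 				currentTime = alpha2beta[j] + 100
-- 				break
--
-- 		for k in range(len(beta2alpha)):
-- 			if currentTime <= beta2alpha[k]:
-- 				currentTime = beta2alpha[k] + 100
-- 				break
--
-- 	return currentTime
-- ===== SOURCE B (Python) =====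
-- def _records(l):
--     # strictly increasing list of left-to-right prefix maxima; only these
--     # elements can ever be the first departure >= the current time
--     recs = []
--     best = None
--     for v in l:
--         if best is None or v > best:
--             recs.append(v)
--             best = v
--     return recs
--
--
-- def _hop(recs, t):
--     for r in recs:
--         if t <= r:
--             return r + 100
--     return t
--
--
-- def missionsCompleted(alpha2beta, beta2alpha, missions):
--     ra = _records(alpha2beta)
--     rb = _records(beta2alpha)
--     t = 0
--     done = 0
--     while done < missions:
--         nt = _hop(rb, _hop(ra, t))
--         if nt == t:
--             break  # fixed point: no further mission changes the time
--         t = nt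
--         done += 1
--     return t
-- ===== Notes on version B (the rewrite author's own statement) =====
-- stated objective: faster
-- what changed: B precomputes the strictly-increasing list of prefix-maximum 'record' departures for each schedule (only those can ever be the first departure >= current time), scans only those per mission, and stops the mission loop at the first fixed point (a mission that leaves the time unchanged), instead of A's full rescan of both lists for every mission.
import Mathlib
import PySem

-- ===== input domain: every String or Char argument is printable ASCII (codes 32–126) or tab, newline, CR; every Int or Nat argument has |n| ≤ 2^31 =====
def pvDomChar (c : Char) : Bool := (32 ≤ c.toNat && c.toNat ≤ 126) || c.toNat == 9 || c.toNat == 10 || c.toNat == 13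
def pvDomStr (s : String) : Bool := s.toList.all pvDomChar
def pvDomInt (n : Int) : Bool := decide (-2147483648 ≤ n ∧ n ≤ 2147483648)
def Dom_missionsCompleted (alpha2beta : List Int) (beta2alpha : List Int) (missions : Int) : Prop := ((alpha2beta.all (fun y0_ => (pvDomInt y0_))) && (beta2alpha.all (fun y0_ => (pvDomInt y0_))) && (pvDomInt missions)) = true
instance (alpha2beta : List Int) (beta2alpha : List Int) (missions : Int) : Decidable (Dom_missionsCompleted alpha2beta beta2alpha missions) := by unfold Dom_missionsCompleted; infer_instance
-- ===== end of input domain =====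

-- B replaces A's per-mission rescan of both full schedules by a scan of the
-- precomputed prefix-maximum records plus an early stop at the first fixed
-- point (objective: faster; the mission loop runs at most #records+1 times).

-- ===== PORT A =====
-- inner 'for j in range(len(l)): if t <= l[j]: t = l[j]+100; break'
def pvScanA (l : List Int) (j : Nat) (t : Int) : Int :=
  if h : j < l.length then
    if t ≤ l[j] then l[j] + 100 else pvScanA l (j + 1) t
  else t
termination_by l.length - j

def missionsCompleted (alpha2beta : List Int) (beta2alpha : List Int) (missions : Int) : Int :=
  (PySem.List.pyRange 0 missions 1).foldl
    (fun currentTime _ =>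
      let t1 := pvScanA alpha2beta 0 currentTime
      pvScanA beta2alpha 0 t1) 0

-- ===== PORT B =====
-- one step of Source B's _records loop: append v when best is None or v > best
def pvRecStep (s : List Int × Option Int) (v : Int) : List Int × Option Int :=
  match s.2 with
  | none => (s.1 ++ [v], some v)
  | some b => if b < v then (s.1 ++ [v], some v) else s

def pvRecordsB (l : List Int) : List Int :=
  (l.foldl pvRecStep ([], none)).1

-- Source B's _hop: first record >= t, else t unchanged
def pvHopB (recs : List Int) (t : Int) : Int :=
  match recs with
  | [] => t
  | r :: rs => if t ≤ r then r + 100 else pvHopB rs t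

-- Source B's while loop with the fixed-point break; fuel = remaining missions
def pvLoopB (ra rb : List Int) (fuel : Nat) (t : Int) : Int :=
  match fuel with
  | 0 => t
  | n + 1 =>
    let nt := pvHopB rb (pvHopB ra t)
    if nt = t then t else pvLoopB ra rb n nt

def missionsCompleted_alt (alpha2beta : List Int) (beta2alpha : List Int) (missions : Int) : Int :=
  pvLoopB (pvRecordsB alpha2beta) (pvRecordsB beta2alpha) missions.toNat 0

-- ===== PRECONDITION & SPEC =====
def Spec_missionsCompleted (alpha2beta : List Int) (beta2alpha : List Int) (missions : Int) (out : Int) : Prop := out = missionsCompleted_alt alpha2beta beta2alpha missions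
instance (alpha2beta : List Int) (beta2alpha : List Int) (missions : Int) (out : Int) : Decidable (Spec_missionsCompleted alpha2beta beta2alpha missions out) := by unfold Spec_missionsCompleted; infer_instance

-- ===== CLAIM (what is proved, stated in full; the proofs are below) =====
def Claim_equal_missionsCompleted : Prop := ∀ (alpha2beta : List Int) (beta2alpha : List Int) (missions : Int), Dom_missionsCompleted alpha2beta beta2alpha missions → Spec_missionsCompleted alpha2beta beta2alpha missions (missionsCompleted alpha2beta beta2alpha missions)

-- ===== LEMMAS AND PROOFS =====

-- cons-structured version of A's inner scan (proof helper)
def pvScanL (t : Int) : List Int → Int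
  | [] => t
  | x :: xs => if t ≤ x then x + 100 else pvScanL t xs

-- cons-structured version of the records of l with running maximum b
def pvRecAux (b : Int) : List Int → List Int
  | [] => []
  | v :: vs => if b < v then v :: pvRecAux v vs else pvRecAux b vs

theorem pvScanA_eq_scanL (l : List Int) (j : Nat) (t : Int) :
    pvScanA l j t = pvScanL t (l.drop j) := by
  fun_induction pvScanA l j t
  case case1 h ht =>
    rw [List.drop_eq_getElem_cons h]
    simp [pvScanL, ht]
  case case2 h ht ih =>
    rw [List.drop_eq_getElem_cons h]
    simp [pvScanL, ht, ih]
  case case3 h =>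
    rw [List.drop_eq_nil_of_le (by omega)]
    simp [pvScanL]

theorem pvRecStep_foldl (l : List Int) : ∀ (recs : List Int) (b : Int),
    (l.foldl pvRecStep (recs, some b)).1 = recs ++ pvRecAux b l := by
  induction l with
  | nil => simp [pvRecAux]
  | cons v vs ih =>
    intro recs b
    by_cases hb : b < v
    · simp [List.foldl_cons, pvRecStep, hb, pvRecAux, ih]
    · simp [List.foldl_cons, pvRecStep, hb, pvRecAux, ih]

theorem pvRecordsB_cons (x : Int) (xs : List Int) :
    pvRecordsB (x :: xs) = x :: pvRecAux x xs := by
  simp [pvRecordsB, List.foldl_cons, pvRecStep, pvRecStep_foldl]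

-- only the prefix-maximum records can be the first element ≥ t (t above the running max)
theorem pvScanL_eq_hop_recAux (l : List Int) : ∀ (b t : Int), b < t →
    pvScanL t l = pvHopB (pvRecAux b l) t := by
  induction l with
  | nil => intro b t _; simp [pvScanL, pvRecAux, pvHopB]
  | cons y ys ih =>
    intro b t h
    by_cases hy : b < y
    · by_cases ht : t ≤ y
      · simp [pvScanL, pvRecAux, pvHopB, hy, ht]
      · simp [pvScanL, pvRecAux, pvHopB, hy, ht, ih y t (by omega)]
    · have hty : ¬ t ≤ y := by omega
      simp [pvScanL, pvRecAux, hy, hty, ih b t h]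

theorem pvScanA_eq_hop (l : List Int) (t : Int) :
    pvScanA l 0 t = pvHopB (pvRecordsB l) t := by
  rw [pvScanA_eq_scanL, List.drop_zero]
  cases l with
  | nil => simp [pvScanL, pvRecordsB, pvHopB]
  | cons x xs =>
    rw [pvRecordsB_cons]
    by_cases ht : t ≤ x
    · simp [pvScanL, pvHopB, ht]
    · simp [pvScanL, pvHopB, ht, pvScanL_eq_hop_recAux xs x t (by omega)]

theorem foldl_const_iterate {α : Type} (f : Int → Int) (L : List α) :
    ∀ t : Int, L.foldl (fun s _ => f s) t = f^[L.length] t := by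
  induction L with
  | nil => intro t; simp
  | cons x xs ih =>
    intro t
    simp [List.foldl_cons, ih, Function.iterate_succ_apply]

theorem pvLoopB_eq_iterate (ra rb : List Int) (n : Nat) :
    ∀ t : Int, pvLoopB ra rb n t = (fun s => pvHopB rb (pvHopB ra s))^[n] t := by
  induction n with
  | zero => intro t; simp [pvLoopB]
  | succ k ih =>
    intro t
    by_cases hfix : pvHopB rb (pvHopB ra t) = t
    · simp only [pvLoopB, hfix]
      exact (Function.iterate_fixed hfix (k + 1)).symm
    · simp only [pvLoopB, if_neg hfix]
      rw [ih, Function.iterate_succ_apply]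

-- ===== VERDICT (by name: the statement is the Claim_ definition above) =====
theorem missionsCompleted_spec : Claim_equal_missionsCompleted := by
  intro a b m _
  unfold Spec_missionsCompleted missionsCompleted missionsCompleted_alt
  have hstep : (fun currentTime : Int =>
      let t1 := pvScanA a 0 currentTime
      pvScanA b 0 t1) = (fun s => pvHopB (pvRecordsB b) (pvHopB (pvRecordsB a) s)) := by
    funext t; simp [pvScanA_eq_hop]
  rw [foldl_const_iterate, hstep, pvLoopB_eq_iterate]
  simp [PySem.List.length_pyRange_one]
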